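-- pv_equiv track=rewrite | github.com/Vishva-1105/Python_Basics | main.py | r_tuple
-- ===== SOURCE A (Python) =====
-- def r_tuple(lst,res):
--     if not lst:
--         return res
--     elif None in lst[0]:
--         return r_tuple(lst[1:],res)
--     else:
--         res.append(lst[0])
--         return r_tuple(lst[1:],res)
-- ===== SOURCE B (Python) =====
-- def r_tuple(lst, res):
--     res.extend(t for t in lst if None not in t)
--     return res
-- ===== Notes on version B (the rewrite author's own statement) =====
-- stated objective: simpler
-- what changed: Replaced the tail recursion over lst[1:] slices with a single flat extend of res by a generator filtering out sublists containing None (also mutating res in place like A).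
import Mathlib
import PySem

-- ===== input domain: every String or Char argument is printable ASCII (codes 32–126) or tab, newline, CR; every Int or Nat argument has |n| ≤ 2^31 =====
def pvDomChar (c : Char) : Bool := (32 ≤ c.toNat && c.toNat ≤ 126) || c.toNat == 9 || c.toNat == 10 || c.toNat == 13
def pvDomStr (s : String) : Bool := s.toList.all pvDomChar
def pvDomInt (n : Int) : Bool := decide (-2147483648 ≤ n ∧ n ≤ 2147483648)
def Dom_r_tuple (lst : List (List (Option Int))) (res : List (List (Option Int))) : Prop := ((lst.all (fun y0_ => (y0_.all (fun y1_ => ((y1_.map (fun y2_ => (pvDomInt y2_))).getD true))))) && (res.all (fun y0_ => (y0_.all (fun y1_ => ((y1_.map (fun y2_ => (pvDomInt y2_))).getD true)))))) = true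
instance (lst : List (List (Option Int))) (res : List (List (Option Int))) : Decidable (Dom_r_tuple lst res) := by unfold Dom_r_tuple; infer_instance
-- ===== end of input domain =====

-- B replaces A's tail recursion over list slices with one flat filter-extend of res (same return value; like A, the Python B mutates res in place).


-- ===== PORT A =====
-- Literal port of A: recursion on lst, appending lst[0] to res when it has no None.
def r_tuple (lst : List (List (Option Int))) (res : List (List (Option Int))) : List (List (Option Int)) :=
  match lst with
  | [] => res
  | x :: rest =>
      if x.contains none then r_tuple rest res
      else r_tuple rest (res ++ [x])

-- ===== PORT B =====
-- Port of B: res extended by the filter of lst keeping sublists without None.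
def r_tuple_alt (lst : List (List (Option Int))) (res : List (List (Option Int))) : List (List (Option Int)) :=
  res ++ lst.filter (fun t => !(t.contains none))

-- ===== PRECONDITION & SPEC =====
def Spec_r_tuple (lst : List (List (Option Int))) (res : List (List (Option Int))) (out : List (List (Option Int))) : Prop := out = r_tuple_alt lst res
instance (lst : List (List (Option Int))) (res : List (List (Option Int))) (out : List (List (Option Int))) : Decidable (Spec_r_tuple lst res out) := by unfold Spec_r_tuple; infer_instance

-- ===== CLAIM (what is proved, stated in full; the proofs are below) =====
def Claim_equal_r_tuple : Prop := ∀ (lst : List (List (Option Int))) (res : List (List (Option Int))), Dom_r_tuple lst res → Spec_r_tuple lst res (r_tuple lst res)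

-- ===== LEMMAS AND PROOFS =====

-- ===== VERDICT (by name: the statement is the Claim_ definition above) =====
theorem r_tuple_agree (lst res : List (List (Option Int))) :
    r_tuple lst res = r_tuple_alt lst res := by
  induction lst generalizing res with
  | nil => simp [r_tuple, r_tuple_alt]
  | cons x rest ih =>
      simp only [r_tuple, r_tuple_alt, List.filter]
      by_cases h : none ∈ x
      · simp [h, ih res, r_tuple_alt]
      · simp [h, ih (res ++ [x]), r_tuple_alt]

theorem r_tuple_spec : Claim_equal_r_tuple := by
  intro lst res _
  unfold Spec_r_tuple
  exact r_tuple_agree lst res
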